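-- pv_equiv track=rewrite | github.com/jyeoniii/algorithm | 20210126/min_rewards.py | minRewards
-- ===== SOURCE A (Python) =====
-- def minRewards(scores):
--     rewards = [1] * len(scores)
--     for i in range(1, len(scores)):
--         if scores[i - 1] < scores[i]:
--             rewards[i] = rewards[i - 1] + 1
--
--     for i in range(len(scores) - 2, -1, -1):
--         if scores[i] > scores[i + 1]:
--             rewards[i] = max(rewards[i + 1] + 1, rewards[i])
--
--     return sum(rewards)
-- ===== SOURCE B (Python) =====
-- def minRewards(scores):
--     if not scores:
--         return 0
--     ret = 1
--     up = down = peak = 0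
--     for i in range(1, len(scores)):
--         if scores[i - 1] < scores[i]:
--             up += 1
--             down = 0
--             peak = up
--             ret += 1 + up
--         elif scores[i - 1] == scores[i]:
--             up = down = peak = 0
--             ret += 1
--         else:
--             down += 1
--             up = 0
--             ret += 1 + down
--             if peak >= down:
--                 ret -= 1
--     return ret
-- ===== Notes on version B (the rewrite author's own statement) =====
-- stated objective: faster
-- what changed: Replaces A's rewards array with its forward and backward correction passes and final sum by the single-pass O(1)-space slope-counting algorithm (up/down/peak counters accumulating the total directly, with a peak correction on descending runs).
import Mathlib
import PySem

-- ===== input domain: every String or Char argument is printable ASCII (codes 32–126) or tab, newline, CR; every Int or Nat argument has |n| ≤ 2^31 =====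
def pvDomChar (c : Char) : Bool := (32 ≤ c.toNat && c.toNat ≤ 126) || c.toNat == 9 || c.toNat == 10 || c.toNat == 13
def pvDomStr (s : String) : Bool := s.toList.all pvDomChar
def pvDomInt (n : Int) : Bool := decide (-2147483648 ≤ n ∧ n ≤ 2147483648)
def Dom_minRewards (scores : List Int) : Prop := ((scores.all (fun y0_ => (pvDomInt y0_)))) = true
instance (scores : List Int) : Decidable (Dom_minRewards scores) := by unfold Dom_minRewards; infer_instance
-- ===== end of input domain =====

-- B replaces A's rewards array and its forward+backward array passes with the O(1)-space
-- single-pass slope-counting algorithm (up/down/peak counters accumulating the total directly).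

-- ===== PORT A =====
-- loop body of A's first (forward) pass
def pvStep1 (scores : List Int) (r : List Int) (i : Int) : List Int :=
  if PySem.List.pyGetD scores (i - 1) 0 < PySem.List.pyGetD scores i 0 then
    PySem.List.pySetD r i (PySem.List.pyGetD r (i - 1) 0 + 1)
  else r

-- loop body of A's second (backward) pass
def pvStep2 (scores : List Int) (r : List Int) (i : Int) : List Int :=
  if PySem.List.pyGetD scores (i + 1) 0 < PySem.List.pyGetD scores i 0 then
    PySem.List.pySetD r i (max (PySem.List.pyGetD r (i + 1) 0 + 1) (PySem.List.pyGetD r i 0))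
  else r

def minRewards (scores : List Int) : Int :=
  let n : Int := scores.length
  let rewards := List.replicate scores.length (1 : Int)
  let r1 := (PySem.List.pyRange 1 n 1).foldl (pvStep1 scores) rewards
  let r2 := (PySem.List.pyRange (n - 2) (-1) (-1)).foldl (pvStep2 scores) r1
  r2.sum

-- ===== PORT B =====
-- loop body of B's single pass; state is (ret, up, down, peak)
def pvSlope (scores : List Int) (st : Int × Int × Int × Int) (i : Int) : Int × Int × Int × Int :=
  if PySem.List.pyGetD scores (i - 1) 0 < PySem.List.pyGetD scores i 0 then
    (st.1 + 1 + (st.2.1 + 1), st.2.1 + 1, 0, st.2.1 + 1)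
  else if PySem.List.pyGetD scores (i - 1) 0 = PySem.List.pyGetD scores i 0 then
    (st.1 + 1, 0, 0, 0)
  else
    (if st.2.2.2 ≥ st.2.2.1 + 1 then st.1 + 1 + (st.2.2.1 + 1) - 1
     else st.1 + 1 + (st.2.2.1 + 1),
     0, st.2.2.1 + 1, st.2.2.2)

def minRewards_alt (scores : List Int) : Int :=
  if scores = [] then 0
  else ((PySem.List.pyRange 1 (scores.length : Int) 1).foldl (pvSlope scores) (1, 0, 0, 0)).1

-- ===== PRECONDITION & SPEC =====
def Spec_minRewards (scores : List Int) (out : Int) : Prop := out = minRewards_alt scores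
instance (scores : List Int) (out : Int) : Decidable (Spec_minRewards scores out) := by unfold Spec_minRewards; infer_instance

-- ===== CLAIM (what is proved, stated in full; the proofs are below) =====
def Claim_equal_minRewards : Prop := ∀ (scores : List Int), Dom_minRewards scores → Spec_minRewards scores (minRewards scores)

-- ===== LEMMAS AND PROOFS =====

-- run lengths of strictly increasing runs (proof-side characterisation of A's rewards array)
def pvRunsGo (prev run : Int) : List Int → List Int
  | [] => []
  | x :: xs =>
    let r := if prev < x then run + 1 else 1
    r :: pvRunsGo x r xs

def pvRuns : List Int → List Int
  | [] => []
  | x :: xs => 1 :: pvRunsGo x 1 xs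

def pvL (s : List Int) : List Int := pvRuns s
def pvR (s : List Int) : List Int := (pvRuns s.reverse).reverse
def pvM (s : List Int) : List Int := ((pvL s).zip (pvR s)).map (fun p => max p.1 p.2)

theorem pvRunsGo_length (prev run : Int) (xs : List Int) : (pvRunsGo prev run xs).length = xs.length := by
  induction xs generalizing prev run with
  | nil => rfl
  | cons x xs ih => simp [pvRunsGo, ih]

theorem pvRuns_length (xs : List Int) : (pvRuns xs).length = xs.length := by
  cases xs with
  | nil => rfl
  | cons x xs => simp [pvRuns, pvRunsGo_length]

theorem pvL_length (s : List Int) : (pvL s).length = s.length := pvRuns_length s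
theorem pvR_length (s : List Int) : (pvR s).length = s.length := by
  simp [pvR, pvRuns_length]
theorem pvM_length (s : List Int) : (pvM s).length = s.length := by
  simp [pvM, pvL_length, pvR_length]

theorem pvRunsGo_pos (prev run : Int) (xs : List Int) (hr : 0 ≤ run) :
    ∀ y ∈ pvRunsGo prev run xs, 1 ≤ y := by
  induction xs generalizing prev run with
  | nil => intro y hy; simp [pvRunsGo] at hy
  | cons x xs ih =>
    intro y hy
    simp only [pvRunsGo, List.mem_cons] at hy
    rcases hy with h | h
    · subst h; split_ifs <;> omega
    · exact ih x _ (by split_ifs <;> omega) y h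

theorem pvRuns_pos (xs : List Int) : ∀ y ∈ pvRuns xs, 1 ≤ y := by
  cases xs with
  | nil => intro y hy; simp [pvRuns] at hy
  | cons x xs =>
    intro y hy
    simp only [pvRuns, List.mem_cons] at hy
    rcases hy with h | h
    · omega
    · exact pvRunsGo_pos x 1 xs (by omega) y h

theorem pvL_pos (s : List Int) (i : Nat) (h : i < (pvL s).length) : 1 ≤ (pvL s)[i] :=
  pvRuns_pos s _ (List.getElem_mem h)

theorem pvR_pos (s : List Int) (i : Nat) (h : i < (pvR s).length) : 1 ≤ (pvR s)[i] := by
  have hm := List.getElem_mem h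
  have : (pvR s)[i] ∈ pvRuns s.reverse := by
    rw [← List.mem_reverse]; exact hm
  exact pvRuns_pos s.reverse _ this

theorem pvRunsGo_getElem_succ (prev run : Int) (xs : List Int) (i : Nat) (h : i + 1 < xs.length) :
    (pvRunsGo prev run xs)[i + 1]'(by rw [pvRunsGo_length]; omega) =
      if xs[i]'(by omega) < xs[i + 1]'h then
        (pvRunsGo prev run xs)[i]'(by rw [pvRunsGo_length]; omega) + 1
      else 1 := by
  induction xs generalizing prev run i with
  | nil => simp at h
  | cons x xs ih =>
    cases i with
    | zero =>
      cases xs with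
      | nil => simp at h
      | cons y ys => simp [pvRunsGo]
    | succ j =>
      have h' : j + 1 < xs.length := by simpa using h
      simpa [pvRunsGo] using ih x _ j h'

theorem pvRuns_adj (xs : List Int) (i : Nat) (h : i + 1 < xs.length) :
    (pvRuns xs)[i + 1]'(by rw [pvRuns_length]; omega) =
      if xs[i]'(by omega) < xs[i + 1]'h then
        (pvRuns xs)[i]'(by rw [pvRuns_length]; omega) + 1
      else 1 := by
  cases xs with
  | nil => simp at h
  | cons x xs =>
    cases i with
    | zero =>
      cases xs with
      | nil => simp at h
      | cons y ys => simp [pvRuns, pvRunsGo]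
    | succ j =>
      have h' : j + 1 < xs.length := by simpa using h
      simpa [pvRuns] using pvRunsGo_getElem_succ x 1 xs j h'

theorem pvL_adj (s : List Int) (i : Nat) (h : i + 1 < s.length) :
    (pvL s)[i + 1]'(by rw [pvL_length]; omega) =
      if s[i]'(by omega) < s[i + 1]'h then (pvL s)[i]'(by rw [pvL_length]; omega) + 1 else 1 :=
  pvRuns_adj s i h

theorem pvL_zero (s : List Int) (h : 0 < s.length) : (pvL s)[0]'(by rw [pvL_length]; omega) = 1 := by
  cases s with
  | nil => simp at h
  | cons x xs => rfl

theorem pvGetIdx {α : Type} (l : List α) {i j : Nat} (hij : i = j) (h : j < l.length) :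
    l[i]'(by omega) = l[j]'h := by
  subst hij; rfl

theorem pvR_getElem (s : List Int) (i : Nat) (h : i < s.length) :
    (pvR s)[i]'(by rw [pvR_length]; omega) =
      (pvRuns s.reverse)[s.length - 1 - i]'(by rw [pvRuns_length]; simp; omega) := by
  have hl : (pvRuns s.reverse).length = s.length := by rw [pvRuns_length]; simp
  simp only [pvR, List.getElem_reverse]
  exact pvGetIdx _ (by omega) _

theorem pvR_last (s : List Int) (h : 0 < s.length) :
    (pvR s)[s.length - 1]'(by rw [pvR_length]; omega) = 1 := by
  rw [pvR_getElem s (s.length - 1) (by omega)]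
  have h0 : 0 < s.reverse.length := by simpa using h
  rw [pvGetIdx (pvRuns s.reverse) (show s.length - 1 - (s.length - 1) = 0 by omega)
      (by rw [pvRuns_length]; omega)]
  exact pvL_zero s.reverse h0

theorem pvR_adj (s : List Int) (i : Nat) (h : i + 1 < s.length) :
    (pvR s)[i]'(by rw [pvR_length]; omega) =
      if s[i + 1]'h < s[i]'(by omega) then (pvR s)[i + 1]'(by rw [pvR_length]; omega) + 1 else 1 := by
  have hrev : s.reverse.length = s.length := by simp
  have hj : (s.length - 2 - i) + 1 < s.reverse.length := by omega
  have hadj := pvRuns_adj s.reverse (s.length - 2 - i) hj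
  have hrj : s.reverse[s.length - 2 - i]'(by omega) = s[i + 1]'h := by
    rw [List.getElem_reverse]
    exact pvGetIdx _ (by omega) _
  have hrj1 : s.reverse[(s.length - 2 - i) + 1]'hj = s[i]'(by omega) := by
    rw [List.getElem_reverse]
    exact pvGetIdx _ (by omega) _
  rw [pvR_getElem s i (by omega), pvR_getElem s (i + 1) h]
  rw [pvGetIdx (pvRuns s.reverse) (show s.length - 1 - i = (s.length - 2 - i) + 1 by omega)
      (by rw [pvRuns_length]; omega)]
  rw [hadj, hrj, hrj1,
    pvGetIdx (pvRuns s.reverse)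
      (show s.length - 2 - i = s.length - 1 - (i + 1) by omega) (by rw [pvRuns_length]; omega)]

theorem pvM_getElem (s : List Int) (i : Nat) (h : i < s.length) :
    (pvM s)[i]'(by rw [pvM_length]; omega) =
      max ((pvL s)[i]'(by rw [pvL_length]; omega)) ((pvR s)[i]'(by rw [pvR_length]; omega)) := by
  simp [pvM, List.getElem_zip]

theorem pvGetNat (xs : List Int) (k : Nat) (d : Int) (h : k < xs.length) :
    PySem.List.pyGetD xs (k : Int) d = xs[k] := by
  rw [PySem.List.pyGetD_natCast]; exact List.getD_eq_getElem xs d h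

theorem pvTakeSucc (l : List Int) (i : Nat) (h : i < l.length) :
    l.take (i + 1) = l.take i ++ [l[i]] := by
  rw [← List.take_concat_get h, List.concat_eq_append]

theorem pvStep1_trans (s : List Int) (k : Nat) (h1 : 1 ≤ k) (h2 : k < s.length) :
    pvStep1 s ((pvL s).take k ++ List.replicate (s.length - k) 1) (k : Int) =
      (pvL s).take (k + 1) ++ List.replicate (s.length - (k + 1)) 1 := by
  obtain ⟨j, rfl⟩ : ∃ j, k = j + 1 := ⟨k - 1, by omega⟩
  have hL := pvL_length s
  have hadj := pvL_adj s j (by omega)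
  have hc1 : ((j + 1 : Nat) : Int) - 1 = ((j : Nat) : Int) := by push_cast; ring
  unfold pvStep1
  rw [hc1, pvGetNat s j 0 (by omega), pvGetNat s (j + 1) 0 h2]
  have hlen_take : ((pvL s).take (j + 1)).length = j + 1 := by simp; omega
  have hmixlen : ((pvL s).take (j + 1) ++ List.replicate (s.length - (j + 1)) 1).length = s.length := by
    simp; omega
  have hmj : PySem.List.pyGetD ((pvL s).take (j + 1) ++ List.replicate (s.length - (j + 1)) 1)
      ((j : Nat) : Int) 0 = (pvL s)[j]'(by omega) := by
    rw [pvGetNat _ j 0 (by rw [hmixlen]; omega),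
      List.getElem_append_left (by rw [hlen_take]; omega), List.getElem_take]
  split_ifs with hc
  · rw [hmj, PySem.List.pySetD_natCast, List.set_append, if_neg (by rw [hlen_take]; omega),
      hlen_take, Nat.sub_self,
      show s.length - (j + 1) = (s.length - (j + 2)) + 1 by omega,
      List.replicate_succ, List.set_cons_zero,
      pvTakeSucc (pvL s) (j + 1) (by omega), hadj, if_pos hc, List.append_assoc,
      List.singleton_append]
  · rw [pvTakeSucc (pvL s) (j + 1) (by omega), hadj, if_neg hc,
      show s.length - (j + 1) = (s.length - (j + 2)) + 1 by omega,
      List.replicate_succ, List.append_assoc, List.singleton_append]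

theorem pass1_inv (s : List Int) (k : Nat) (hk : k ≤ s.length) :
    (PySem.List.pyRange 1 (k : Int) 1).foldl (pvStep1 s) (List.replicate s.length 1) =
      (pvL s).take k ++ List.replicate (s.length - k) 1 := by
  induction k with
  | zero =>
    rw [show PySem.List.pyRange 1 ((0 : Nat) : Int) 1 = [] from rfl]
    simp
  | succ j ih =>
    have hone : (pvL s).take 1 ++ List.replicate (s.length - 1) 1 = List.replicate s.length 1 := by
      rw [pvTakeSucc (pvL s) 0 (by rw [pvL_length]; omega), pvL_zero s (by omega), List.take_zero,
        List.nil_append, List.singleton_append, ← List.replicate_succ,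
        show (s.length - 1) + 1 = s.length from by omega]
    by_cases hj : j = 0
    · subst hj
      rw [show ((0 + 1 : Nat) : Int) = (1 : Int) from by norm_num,
        show PySem.List.pyRange 1 1 1 = [] from rfl, List.foldl_nil, ← hone]
    · rw [show ((j + 1 : Nat) : Int) = ((j : Nat) : Int) + 1 from by push_cast; ring,
        PySem.List.pyRange_one_succ_right (by omega : (1 : Int) ≤ ((j : Nat) : Int)),
        List.foldl_append, ih (by omega), List.foldl_cons, List.foldl_nil]
      exact pvStep1_trans s j (by omega) (by omega)

theorem pyRange_down_eq (m : Nat) :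
    PySem.List.pyRange (m : Int) (-1) (-1) =
      (List.range (m + 1)).map (fun k : Nat => (m : Int) - (k : Int)) := by
  simp [PySem.List.pyRange]
  rw [if_pos (by omega : (-1:Int) < (m:Int))]
  simp [sub_eq_add_neg]

theorem pyRange_down_cons (m : Nat) :
    PySem.List.pyRange ((m : Int) + 1) (-1) (-1) =
      ((m : Int) + 1) :: PySem.List.pyRange (m : Int) (-1) (-1) := by
  have h1 : ((m : Int) + 1) = ((m + 1 : Nat) : Int) := by push_cast; ring
  rw [h1, pyRange_down_eq, pyRange_down_eq, List.range_succ_eq_map]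
  simp only [List.map_cons, List.map_map]
  have htail : List.map ((fun k : Nat => ((m+1:Nat):Int) - (k:Int)) ∘ Nat.succ) (List.range (m+1))
      = List.map (fun k : Nat => (m:Int) - (k:Int)) (List.range (m+1)) := by
    apply List.map_congr_left
    intro k hk
    simp only [Function.comp, Nat.succ_eq_add_one]
    push_cast
    ring
  rw [htail]
  norm_num

theorem pvStep2_trans (s : List Int) (j : Nat) (h : j + 1 < s.length) :
    pvStep2 s ((pvL s).take (j + 1) ++ (pvM s).drop (j + 1)) (j : Int) =
      (pvL s).take j ++ (pvM s).drop j := by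
  have hL := pvL_length s
  have hR := pvR_length s
  have hM := pvM_length s
  have hlen_take : ((pvL s).take (j + 1)).length = j + 1 := by simp [hL]; omega
  have hmixlen : ((pvL s).take (j + 1) ++ (pvM s).drop (j + 1)).length = s.length := by
    simp [hL, hM]; omega
  unfold pvStep2
  rw [show ((j : Nat) : Int) + 1 = ((j + 1 : Nat) : Int) from by push_cast; ring,
    pvGetNat s (j + 1) 0 h, pvGetNat s j 0 (by omega)]
  have haj : PySem.List.pyGetD ((pvL s).take (j + 1) ++ (pvM s).drop (j + 1)) ((j : Nat) : Int) 0 =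
      (pvL s)[j]'(by omega) := by
    rw [pvGetNat _ j 0 (by rw [hmixlen]; omega),
      List.getElem_append_left (by rw [hlen_take]; omega), List.getElem_take]
  have haj1 : PySem.List.pyGetD ((pvL s).take (j + 1) ++ (pvM s).drop (j + 1))
      ((j + 1 : Nat) : Int) 0 = (pvM s)[j + 1]'(by omega) := by
    rw [pvGetNat _ (j + 1) 0 (by rw [hmixlen]; omega),
      List.getElem_append_right (by rw [hlen_take])]
    simp only [hlen_take, Nat.sub_self, List.getElem_drop, Nat.add_zero]
  have hMj : (pvM s)[j]'(by omega) =
      max ((pvL s)[j]'(by omega)) ((pvR s)[j]'(by omega)) := pvM_getElem s j (by omega)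
  have hMj1 : (pvM s)[j + 1]'(by omega) =
      max ((pvL s)[j + 1]'(by omega)) ((pvR s)[j + 1]'(by omega)) := pvM_getElem s (j + 1) h
  have hRadj := pvR_adj s j h
  have hLadj := pvL_adj s j h
  split_ifs with hc
  · rw [haj1, haj, PySem.List.pySetD_natCast]
    have hval : max ((pvM s)[j + 1]'(by omega) + 1) ((pvL s)[j]'(by omega)) =
        (pvM s)[j]'(by omega) := by
      have hLj1 : (pvL s)[j + 1]'(by omega) = 1 := by rw [hLadj, if_neg (by omega)]
      have hRj : (pvR s)[j]'(by omega) = (pvR s)[j + 1]'(by omega) + 1 := by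
        rw [hRadj, if_pos hc]
      have h1R : 1 ≤ (pvR s)[j + 1]'(by omega) := pvR_pos s (j + 1) (by rw [hR]; omega)
      rw [hMj1, hMj, hLj1, hRj]
      omega
    rw [hval, List.set_append, if_pos (by rw [hlen_take]; omega),
      pvTakeSucc (pvL s) j (by omega), List.set_append,
      if_neg (by simp [hL])]
    have hjj : ((pvL s).take j).length = j := by simp [hL]; omega
    rw [hjj, Nat.sub_self, List.set_cons_zero, List.append_assoc, List.singleton_append,
      ← List.drop_eq_getElem_cons (by rw [hM]; omega)]
  · have hRj : (pvR s)[j]'(by omega) = 1 := by rw [hRadj, if_neg hc]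
    have hMjL : (pvM s)[j]'(by omega) = (pvL s)[j]'(by omega) := by
      have h1L : 1 ≤ (pvL s)[j]'(by omega) := pvL_pos s j (by rw [hL]; omega)
      rw [hMj, hRj]
      omega
    rw [pvTakeSucc (pvL s) j (by omega), List.append_assoc, List.singleton_append, ← hMjL,
      ← List.drop_eq_getElem_cons (by rw [hM]; omega)]

theorem pass2_inv (s : List Int) (j : Nat) (h : j + 1 < s.length) :
    (PySem.List.pyRange (j : Int) (-1) (-1)).foldl (pvStep2 s)
        ((pvL s).take (j + 1) ++ (pvM s).drop (j + 1)) = pvM s := by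
  induction j with
  | zero =>
    rw [show PySem.List.pyRange ((0 : Nat) : Int) (-1) (-1) = [0] from by decide, List.foldl_cons,
      List.foldl_nil, show (0 : Int) = ((0 : Nat) : Int) from rfl, pvStep2_trans s 0 h]
    simp
  | succ j ih =>
    rw [show ((j + 1 : Nat) : Int) = ((j : Nat) : Int) + 1 from by push_cast; ring,
      pyRange_down_cons j, List.foldl_cons,
      show ((j : Nat) : Int) + 1 = ((j + 1 : Nat) : Int) from by push_cast; ring,
      pvStep2_trans s (j + 1) h]
    exact ih (by omega)

theorem pvM_single (s : List Int) (h1 : s.length = 1) : pvM s = pvL s := by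
  apply List.ext_getElem (by rw [pvM_length, pvL_length])
  intro i hi1 hi2
  have hi0 : i = 0 := by rw [pvM_length] at hi1; omega
  subst hi0
  rw [pvM_getElem s 0 (by omega)]
  have hr : (pvR s)[0]'(by rw [pvR_length]; omega) = 1 := by
    rw [pvGetIdx (pvR s) (show 0 = s.length - 1 from by omega) (by rw [pvR_length]; omega)]
    exact pvR_last s (by omega)
  have h1L : 1 ≤ (pvL s)[0]'(by rw [pvL_length]; omega) := pvL_pos s 0 (by rw [pvL_length]; omega)
  rw [hr]
  omega

-- A computes the pointwise max of the two run-length arrays, summed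
theorem pvA_eq (s : List Int) : minRewards s = (pvM s).sum := by
  by_cases hnil : s = []
  · subst hnil; rfl
  · have hn : 1 ≤ s.length := by
      cases s with
      | nil => exact absurd rfl hnil
      | cons x xs => simp
    have hA : minRewards s =
        ((PySem.List.pyRange ((s.length : Int) - 2) (-1) (-1)).foldl (pvStep2 s)
          ((PySem.List.pyRange 1 (s.length : Int) 1).foldl (pvStep1 s)
            (List.replicate s.length 1))).sum := rfl
    rw [hA, pass1_inv s s.length (le_refl _), List.take_of_length_le (by rw [pvL_length]),
      Nat.sub_self, List.replicate_zero, List.append_nil]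
    by_cases h1 : s.length = 1
    · rw [pvM_single s h1, h1,
        show ((1 : Nat) : Int) - 2 = (-1 : Int) from by norm_num,
        show PySem.List.pyRange (-1) (-1) (-1) = [] from rfl, List.foldl_nil]
    · have h2 : 2 ≤ s.length := by omega
      have hinit : pvL s = (pvL s).take ((s.length - 2) + 1) ++ (pvM s).drop ((s.length - 2) + 1) := by
        have hidx : (s.length - 2) + 1 = s.length - 1 := by omega
        rw [hidx]
        have hdrop : (pvM s).drop (s.length - 1) =
            [(pvM s)[s.length - 1]'(by rw [pvM_length]; omega)] := by
          rw [List.drop_eq_getElem_cons (by rw [pvM_length]; omega)]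
          rw [show (pvM s).drop (s.length - 1 + 1) = [] from
            List.drop_eq_nil_of_le (by rw [pvM_length]; omega)]
        have hMlast : (pvM s)[s.length - 1]'(by rw [pvM_length]; omega) =
            (pvL s)[s.length - 1]'(by rw [pvL_length]; omega) := by
          rw [pvM_getElem s (s.length - 1) (by omega), pvR_last s (by omega)]
          have := pvL_pos s (s.length - 1) (by rw [pvL_length]; omega)
          omega
        rw [hdrop, hMlast, ← pvTakeSucc (pvL s) (s.length - 1) (by rw [pvL_length]; omega),
          show (s.length - 1) + 1 = s.length from by omega,
          List.take_of_length_le (by rw [pvL_length])]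
      have hfold := pass2_inv s (s.length - 2) (by omega)
      rw [← hfold,
        show (s.length : Int) - 2 = ((s.length - 2 : Nat) : Int) from by omega]
      exact congrArg _ (congrArg (fun ini => List.foldl (pvStep2 s) ini
        (PySem.List.pyRange ((s.length - 2 : Nat) : Int) (-1) (-1))) hinit)

-- ===== B-side lemmas =====

theorem pvSum (l : List Int) : l.sum = ∑ j ∈ Finset.range l.length, l.getD j 0 := by
  induction l with
  | nil => simp
  | cons x xs ih =>
    rw [List.sum_cons, ih, List.length_cons, Finset.sum_range_succ']
    simp only [List.getD_cons_succ, List.getD_cons_zero]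
    ring

theorem pvM_take_length (s : List Int) (m : Nat) (hm : m ≤ s.length) :
    (pvM (s.take m)).length = m := by
  rw [pvM_length]; simp; omega

theorem pvRunsGo_take (prev run : Int) (xs : List Int) (m : Nat) :
    pvRunsGo prev run (xs.take m) = (pvRunsGo prev run xs).take m := by
  induction xs generalizing prev run m with
  | nil => simp [pvRunsGo]
  | cons x xs ih =>
    cases m with
    | zero => simp [pvRunsGo]
    | succ k => simp [pvRunsGo, ih]

theorem pvRuns_take (xs : List Int) (m : Nat) : pvRuns (xs.take m) = (pvRuns xs).take m := by
  cases xs with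
  | nil => simp [pvRuns]
  | cons x xs =>
    cases m with
    | zero => simp [pvRuns]
    | succ k => simp [pvRuns, pvRunsGo_take]

theorem pvL_take (s : List Int) (m j : Nat) (hj : j < m) (hjl : j < s.length) :
    (pvL (s.take m))[j]'(by rw [pvL_length]; simp; omega) = (pvL s)[j]'(by rw [pvL_length]; omega) := by
  simp only [pvL, pvRuns_take]
  rw [List.getElem_take]

-- the tail of a list ending in a strictly decreasing run has pvR values length - j
theorem pvR_run (p : List Int) (t : Nat)
    (hrun : ∀ (k : Nat) (_ : t ≤ k) (hk : k + 1 < p.length), p[k + 1]'hk < p[k]'(by omega)) :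
    ∀ (d j : Nat) (hj : j + d + 1 = p.length), t ≤ j →
      (pvR p)[j]'(by rw [pvR_length]; omega) = ((p.length - j : Nat) : Int) := by
  intro d
  induction d with
  | zero =>
    intro j hj ht
    rw [pvGetIdx (pvR p) (show j = p.length - 1 by omega) (by rw [pvR_length]; omega),
      pvR_last p (by omega), show (p.length - j : Nat) = 1 by omega]
    rfl
  | succ e ih =>
    intro j hj ht
    have h1 : j + 1 < p.length := by omega
    rw [pvR_adj p j h1, if_pos (hrun j ht h1), ih (j + 1) (by omega) (by omega)]
    omega

-- pvR values before the start of the final run agree between s.take m and s.take (m+1)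
theorem pvR_pref (s : List Int) (m t : Nat) (h1 : 1 ≤ t) (htm : t ≤ m) (hm : m < s.length)
    (hb : ¬ s[t]'(by omega) < s[t - 1]'(by omega)) :
    ∀ (d j : Nat) (hj : j + d + 1 = t),
      (pvR (s.take (m + 1)))[j]'(by rw [pvR_length]; simp; omega) =
      (pvR (s.take m))[j]'(by rw [pvR_length]; simp; omega) := by
  have hlen1 : (s.take (m + 1)).length = m + 1 := by simp; omega
  have hlen0 : (s.take m).length = m := by simp; omega
  intro d
  induction d with
  | zero =>
    intro j hj
    have hjt : j = t - 1 := by omega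
    subst hjt
    have hL1 : (pvR (s.take (m + 1)))[t - 1]'(by rw [pvR_length]; omega) = 1 := by
      rw [pvR_adj (s.take (m + 1)) (t - 1) (by rw [hlen1]; omega)]
      rw [if_neg (by
        rw [pvGetIdx (s.take (m + 1)) (show t - 1 + 1 = t by omega) (by rw [hlen1]; omega)]
        rw [List.getElem_take, List.getElem_take]
        exact hb)]
    by_cases hteq : t = m
    · rw [hL1, pvGetIdx (pvR (s.take m)) (show t - 1 = (s.take m).length - 1 by omega)
        (by rw [pvR_length]; omega), pvR_last (s.take m) (by omega)]
    · rw [hL1, pvR_adj (s.take m) (t - 1) (by rw [hlen0]; omega)]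
      rw [if_neg (by
        rw [pvGetIdx (s.take m) (show t - 1 + 1 = t by omega) (by rw [hlen0]; omega)]
        rw [List.getElem_take, List.getElem_take]
        exact hb)]
  | succ e ih =>
    intro j hj
    rw [pvR_adj (s.take (m + 1)) j (by rw [hlen1]; omega),
      pvR_adj (s.take m) j (by rw [hlen0]; omega)]
    rw [List.getElem_take, List.getElem_take, List.getElem_take, List.getElem_take]
    rw [ih (j + 1) (by omega)]

theorem pvMaxStep (a d : Int) :
    max a (d + 1) = max a d + (if d ≤ a - 1 then 0 else 1) := by
  by_cases h : a ≤ d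
  · rw [max_eq_right h, max_eq_right (by omega : a ≤ d + 1), if_neg (by omega)]
  · rw [max_eq_left (by omega), max_eq_left (by omega), if_pos (by omega)]
    ring

theorem pvIndSum (t : Nat) (c : Int) :
    ∀ m : Nat, t < m →
      ∑ j ∈ Finset.range m, (if j < t then (0 : Int) else if j = t then c else 1) =
        c + ((m - t - 1 : Nat) : Int) := by
  intro m
  induction m with
  | zero => intro h; exact absurd h (by omega)
  | succ n ih =>
    intro h
    rw [Finset.sum_range_succ]
    by_cases hn : t < n
    · rw [ih hn, if_neg (by omega), if_neg (by omega),
        show (n + 1 - t - 1 : Nat) = (n - t - 1) + 1 by omega]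
      push_cast
      ring
    · have ht : t = n := by omega
      subst ht
      rw [if_neg (by omega), if_pos rfl,
        Finset.sum_eq_zero (fun j hj => if_pos (Finset.mem_range.mp hj)),
        show (t + 1 - t - 1 : Nat) = 0 by omega]
      simp

-- a non-descending new element adds exactly its left-run value to the answer
theorem pvF_up (s : List Int) (i : Nat) (hi : i + 1 < s.length)
    (hle : ¬ s[i + 1]'hi < s[i]'(by omega)) :
    (pvM (s.take (i + 1 + 1))).sum =
      (pvM (s.take (i + 1))).sum + (pvL s)[i + 1]'(by rw [pvL_length]; omega) := by
  have hlen1 : (s.take (i + 1 + 1)).length = i + 1 + 1 := by simp; omega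
  have hlen0 : (s.take (i + 1)).length = i + 1 := by simp; omega
  rw [pvSum (pvM (s.take (i + 1 + 1))), pvSum (pvM (s.take (i + 1))),
    pvM_take_length s (i + 1 + 1) (by omega), pvM_take_length s (i + 1) (by omega),
    Finset.sum_range_succ]
  have hlast : (pvM (s.take (i + 1 + 1))).getD (i + 1) 0 =
      (pvL s)[i + 1]'(by rw [pvL_length]; omega) := by
    rw [List.getD_eq_getElem _ 0 (by rw [pvM_take_length s (i + 1 + 1) (by omega)]; omega),
      pvM_getElem (s.take (i + 1 + 1)) (i + 1) (by rw [hlen1]; omega)]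
    rw [pvGetIdx (pvR (s.take (i + 1 + 1))) (show i + 1 = (s.take (i + 1 + 1)).length - 1 by omega)
        (by rw [pvR_length]; omega),
      pvR_last (s.take (i + 1 + 1)) (by omega)]
    rw [pvL_take s (i + 1 + 1) (i + 1) (by omega) (by omega)]
    exact max_eq_left (pvL_pos s (i + 1) (by rw [pvL_length]; omega))
  rw [hlast]
  congr 1
  apply Finset.sum_congr rfl
  intro j hj
  have hjm : j < i + 1 := Finset.mem_range.mp hj
  rw [List.getD_eq_getElem _ 0 (by rw [pvM_take_length s (i + 1 + 1) (by omega)]; omega),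
    List.getD_eq_getElem _ 0 (by rw [pvM_take_length s (i + 1) (by omega)]; omega),
    pvM_getElem (s.take (i + 1 + 1)) j (by rw [hlen1]; omega),
    pvM_getElem (s.take (i + 1)) j (by rw [hlen0]; omega),
    pvL_take s (i + 1 + 1) j (by omega) (by omega), pvL_take s (i + 1) j (by omega) (by omega)]
  congr 1
  exact pvR_pref s (i + 1) (i + 1) (by omega) (le_refl _) hi hle (i - j) j (by omega)

-- a descending new element extends the final run: the whole run shifts up by one,
-- except that a high enough peak absorbs the shift
theorem pvF_down (s : List Int) (i t : Nat) (hi : i + 1 < s.length) (ht : t ≤ i)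
    (hgt : s[i + 1]'hi < s[i]'(by omega))
    (hrun : ∀ (k : Nat) (_ : t ≤ k) (hk : k + 1 ≤ i), s[k + 1]'(by omega) < s[k]'(by omega))
    (hb : t = 0 ∨ ¬ s[t]'(by omega) < s[t - 1]'(by omega)) :
    (pvM (s.take (i + 1 + 1))).sum =
      (pvM (s.take (i + 1))).sum + 1 + ((i + 1 - t : Nat) : Int) -
        (if ((i + 1 - t : Nat) : Int) ≤ (pvL s)[t]'(by rw [pvL_length]; omega) - 1 then 1 else 0) := by
  have hlen1 : (s.take (i + 1 + 1)).length = i + 1 + 1 := by simp; omega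
  have hlen0 : (s.take (i + 1)).length = i + 1 := by simp; omega
  have hrun1 : ∀ (k : Nat) (_ : t ≤ k) (hk : k + 1 < (s.take (i + 1 + 1)).length),
      (s.take (i + 1 + 1))[k + 1]'hk < (s.take (i + 1 + 1))[k]'(by omega) := by
    intro k hk hkl
    rw [List.getElem_take, List.getElem_take]
    rcases (by rw [hlen1] at hkl; omega : k + 1 ≤ i ∨ k = i) with h | h
    · exact hrun k hk h
    · subst h
      exact hgt
  have hrun0 : ∀ (k : Nat) (_ : t ≤ k) (hk : k + 1 < (s.take (i + 1)).length),
      (s.take (i + 1))[k + 1]'hk < (s.take (i + 1))[k]'(by omega) := by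
    intro k hk hkl
    rw [List.getElem_take, List.getElem_take]
    exact hrun k hk (by rw [hlen0] at hkl; omega)
  rw [pvSum (pvM (s.take (i + 1 + 1))), pvSum (pvM (s.take (i + 1))),
    pvM_take_length s (i + 1 + 1) (by omega), pvM_take_length s (i + 1) (by omega),
    Finset.sum_range_succ]
  have hlast : (pvM (s.take (i + 1 + 1))).getD (i + 1) 0 = 1 := by
    rw [List.getD_eq_getElem _ 0 (by rw [pvM_take_length s (i + 1 + 1) (by omega)]; omega),
      pvM_getElem (s.take (i + 1 + 1)) (i + 1) (by rw [hlen1]; omega)]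
    rw [pvGetIdx (pvR (s.take (i + 1 + 1))) (show i + 1 = (s.take (i + 1 + 1)).length - 1 by omega)
        (by rw [pvR_length]; omega),
      pvR_last (s.take (i + 1 + 1)) (by omega)]
    rw [pvL_take s (i + 1 + 1) (i + 1) (by omega) (by omega),
      show (pvL s)[i + 1]'(by rw [pvL_length]; omega) = 1 from by
        rw [pvL_adj s i hi, if_neg (by omega)]]
    exact max_self 1
  rw [hlast]
  have key : ∀ j ∈ Finset.range (i + 1),
      (pvM (s.take (i + 1 + 1))).getD j 0 =
        (pvM (s.take (i + 1))).getD j 0 +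
          (if j < t then (0 : Int)
           else if j = t then
             (if ((i + 1 - t : Nat) : Int) ≤ (pvL s)[t]'(by rw [pvL_length]; omega) - 1 then 0 else 1)
           else 1) := by
    intro j hj
    have hjm : j < i + 1 := Finset.mem_range.mp hj
    rw [List.getD_eq_getElem _ 0 (by rw [pvM_take_length s (i + 1 + 1) (by omega)]; omega),
      List.getD_eq_getElem _ 0 (by rw [pvM_take_length s (i + 1) (by omega)]; omega),
      pvM_getElem (s.take (i + 1 + 1)) j (by rw [hlen1]; omega),
      pvM_getElem (s.take (i + 1)) j (by rw [hlen0]; omega),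
      pvL_take s (i + 1 + 1) j (by omega) (by omega), pvL_take s (i + 1) j (by omega) (by omega)]
    by_cases hjt : j < t
    · have ht1 : 1 ≤ t := by omega
      have hbb : ¬ s[t]'(by omega) < s[t - 1]'(by omega) := by
        rcases hb with h0 | h0
        · omega
        · exact h0
      rw [if_pos hjt, add_zero]
      congr 1
      exact pvR_pref s (i + 1) t ht1 (by omega) hi hbb (t - 1 - j) j (by omega)
    · by_cases hjeq : j = t
      · subst hjeq
        rw [if_neg hjt, if_pos rfl]
        have hR1 : (pvR (s.take (i + 1 + 1)))[j]'(by rw [pvR_length, hlen1]; omega) =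
            ((i + 1 + 1 - j : Nat) : Int) := by
          have h := pvR_run (s.take (i + 1 + 1)) j hrun1 (i + 1 - j) j (by rw [hlen1]; omega) (by omega)
          rw [h, hlen1]
        have hR0 : (pvR (s.take (i + 1)))[j]'(by rw [pvR_length, hlen0]; omega) =
            ((i + 1 - j : Nat) : Int) := by
          have h := pvR_run (s.take (i + 1)) j hrun0 (i - j) j (by rw [hlen0]; omega) (by omega)
          rw [h, hlen0]
        rw [hR1, hR0,
          show ((i + 1 + 1 - j : Nat) : Int) = ((i + 1 - j : Nat) : Int) + 1 by omega,
          pvMaxStep ((pvL s)[j]'(by rw [pvL_length]; omega)) ((i + 1 - j : Nat) : Int)]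
      · have hjt2 : t < j := by omega
        rw [if_neg hjt, if_neg hjeq]
        have hLj : (pvL s)[j]'(by rw [pvL_length]; omega) = 1 := by
          rw [pvGetIdx (pvL s) (show j = (j - 1) + 1 by omega) (by rw [pvL_length]; omega),
            pvL_adj s (j - 1) (by omega),
            if_neg (by
              have h := hrun (j - 1) (by omega) (by omega)
              rw [pvGetIdx s (show j - 1 + 1 = j by omega) (by omega)] at h ⊢
              omega)]
        have hR1 : (pvR (s.take (i + 1 + 1)))[j]'(by rw [pvR_length, hlen1]; omega) =
            ((i + 1 + 1 - j : Nat) : Int) := by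
          have h := pvR_run (s.take (i + 1 + 1)) t hrun1 (i + 1 - j) j (by rw [hlen1]; omega) (by omega)
          rw [h, hlen1]
        have hR0 : (pvR (s.take (i + 1)))[j]'(by rw [pvR_length, hlen0]; omega) =
            ((i + 1 - j : Nat) : Int) := by
          have h := pvR_run (s.take (i + 1)) t hrun0 (i - j) j (by rw [hlen0]; omega) (by omega)
          rw [h, hlen0]
        rw [hR1, hR0, hLj,
          max_eq_right (by omega : (1 : Int) ≤ ((i + 1 + 1 - j : Nat) : Int)),
          max_eq_right (by omega : (1 : Int) ≤ ((i + 1 - j : Nat) : Int))]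
        omega
  rw [Finset.sum_congr rfl key, Finset.sum_add_distrib, pvIndSum t _ (i + 1) (by omega)]
  split_ifs with hc <;> omega

-- singleton prefix: the answer on one element is 1
theorem pvF_one (s : List Int) (h : s ≠ []) : (pvM (s.take 1)).sum = 1 := by
  cases s with
  | nil => exact absurd rfl h
  | cons x xs => simp [pvM, pvL, pvR, pvRuns, pvRunsGo]

-- the loop invariant of B's single pass: after processing index i the state is
-- (answer of the prefix, L_i - 1, length of the final descending run, L at the run top - 1)
def pvInv (s : List Int) (i : Nat) (st : Int × Int × Int × Int) : Prop :=
  ∃ t : Nat, t ≤ i ∧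
    st.1 = (pvM (s.take (i + 1))).sum ∧
    st.2.1 = (pvL s).getD i 0 - 1 ∧
    st.2.2.1 = ((i - t : Nat) : Int) ∧
    st.2.2.2 = (pvL s).getD t 0 - 1 ∧
    (∀ k, t ≤ k → k + 1 ≤ i → s.getD (k + 1) 0 < s.getD k 0) ∧
    (t = 0 ∨ ¬ s.getD t 0 < s.getD (t - 1) 0)

theorem pvInv_step (s : List Int) (i : Nat) (st : Int × Int × Int × Int)
    (hi : i + 1 < s.length) (h : pvInv s i st) :
    pvInv s (i + 1) (pvSlope s st ((i + 1 : Nat) : Int)) := by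
  obtain ⟨t, htle, hret, hup, hdown, hpeak, hrun, hb⟩ := h
  have hLlen := pvL_length s
  have hLi : (pvL s).getD i 0 = (pvL s)[i]'(by omega) :=
    List.getD_eq_getElem _ 0 (by omega)
  have hLi1 : (pvL s).getD (i + 1) 0 = (pvL s)[i + 1]'(by omega) :=
    List.getD_eq_getElem _ 0 (by omega)
  have hLt : (pvL s).getD t 0 = (pvL s)[t]'(by omega) :=
    List.getD_eq_getElem _ 0 (by omega)
  have hsi : s.getD i 0 = s[i]'(by omega) := List.getD_eq_getElem _ 0 (by omega)
  have hsi1 : s.getD (i + 1) 0 = s[i + 1]'hi := List.getD_eq_getElem _ 0 hi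
  rw [hLi] at hup
  unfold pvSlope
  rw [show ((i + 1 : Nat) : Int) - 1 = ((i : Nat) : Int) by push_cast; ring,
    pvGetNat s i 0 (by omega), pvGetNat s (i + 1) 0 hi]
  have hadj := pvL_adj s i hi
  split_ifs with h1 h2 h3
  · -- up step
    refine ⟨i + 1, le_refl _, ?_, ?_, ?_, ?_, ?_, ?_⟩
    · rw [hret, pvF_up s i hi (by omega), hadj, if_pos h1, hup]
      ring
    · rw [hLi1, hadj, if_pos h1, hup]
      ring
    · rw [show (i + 1 - (i + 1) : Nat) = 0 by omega]
      rfl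
    · rw [hLi1, hadj, if_pos h1, hup]
      ring
    · intro k hk hk1
      omega
    · right
      rw [show (i + 1 - 1 : Nat) = i by omega, hsi, hsi1]
      omega
  · -- equal step
    refine ⟨i + 1, le_refl _, ?_, ?_, ?_, ?_, ?_, ?_⟩
    · rw [hret, pvF_up s i hi (by omega), hadj, if_neg (by omega)]
    · rw [hLi1, hadj, if_neg (by omega)]
      ring
    · rw [show (i + 1 - (i + 1) : Nat) = 0 by omega]
      rfl
    · rw [hLi1, hadj, if_neg (by omega)]
      ring
    · intro k hk hk1
      omega
    · right
      rw [show (i + 1 - 1 : Nat) = i by omega, hsi, hsi1]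
      omega
  · -- down step, peak high enough to absorb the shift
    have hgt : s[i + 1]'hi < s[i]'(by omega) := by omega
    have hrun' : ∀ (k : Nat) (_ : t ≤ k) (hk : k + 1 ≤ i), s[k + 1]'(by omega) < s[k]'(by omega) := by
      intro k hk hk1
      have h0 := hrun k hk hk1
      rw [List.getD_eq_getElem _ 0 (by omega : k + 1 < s.length),
        List.getD_eq_getElem _ 0 (by omega : k < s.length)] at h0
      exact h0
    have hb' : t = 0 ∨ ¬ s[t]'(by omega) < s[t - 1]'(by omega) := by
      rcases hb with h0 | h0
      · exact Or.inl h0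
      · right
        rw [List.getD_eq_getElem _ 0 (by omega : t < s.length),
          List.getD_eq_getElem _ 0 (by omega : t - 1 < s.length)] at h0
        exact h0
    have hF := pvF_down s i t hi htle hgt hrun' hb'
    refine ⟨t, by omega, ?_, ?_, ?_, ?_, ?_, ?_⟩
    · show st.1 + 1 + (st.2.2.1 + 1) - 1 = (pvM (s.take (i + 1 + 1))).sum
      rw [hret, hF, hdown]
      rw [hpeak, hdown, hLt] at h3
      split_ifs with hc <;> omega
    · rw [hLi1, hadj, if_neg h1]
      ring
    · show st.2.2.1 + 1 = ((i + 1 - t : Nat) : Int)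
      rw [hdown]
      omega
    · exact hpeak
    · intro k hk hk1
      rcases (by omega : k + 1 ≤ i ∨ k = i) with h0 | h0
      · exact hrun k hk h0
      · subst h0
        rw [hsi, hsi1]
        omega
    · exact hb
  · -- down step, the peak also moves up
    have hgt : s[i + 1]'hi < s[i]'(by omega) := by omega
    have hrun' : ∀ (k : Nat) (_ : t ≤ k) (hk : k + 1 ≤ i), s[k + 1]'(by omega) < s[k]'(by omega) := by
      intro k hk hk1
      have h0 := hrun k hk hk1
      rw [List.getD_eq_getElem _ 0 (by omega : k + 1 < s.length),
        List.getD_eq_getElem _ 0 (by omega : k < s.length)] at h0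
      exact h0
    have hb' : t = 0 ∨ ¬ s[t]'(by omega) < s[t - 1]'(by omega) := by
      rcases hb with h0 | h0
      · exact Or.inl h0
      · right
        rw [List.getD_eq_getElem _ 0 (by omega : t < s.length),
          List.getD_eq_getElem _ 0 (by omega : t - 1 < s.length)] at h0
        exact h0
    have hF := pvF_down s i t hi htle hgt hrun' hb'
    refine ⟨t, by omega, ?_, ?_, ?_, ?_, ?_, ?_⟩
    · show st.1 + 1 + (st.2.2.1 + 1) = (pvM (s.take (i + 1 + 1))).sum
      rw [hret, hF, hdown]
      rw [hpeak, hdown, hLt] at h3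
      split_ifs with hc <;> omega
    · rw [hLi1, hadj, if_neg h1]
      ring
    · show st.2.2.1 + 1 = ((i + 1 - t : Nat) : Int)
      rw [hdown]
      omega
    · exact hpeak
    · intro k hk hk1
      rcases (by omega : k + 1 ≤ i ∨ k = i) with h0 | h0
      · exact hrun k hk h0
      · subst h0
        rw [hsi, hsi1]
        omega
    · exact hb

theorem pvInv_fold (s : List Int) (k : Nat) (h1 : 1 ≤ k) (hk : k ≤ s.length) :
    pvInv s (k - 1) ((PySem.List.pyRange 1 (k : Int) 1).foldl (pvSlope s) (1, 0, 0, 0)) := by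
  induction k with
  | zero => exact absurd h1 (by omega)
  | succ n ih =>
    by_cases hn : n = 0
    · subst hn
      rw [show ((0 + 1 : Nat) : Int) = (1 : Int) from by norm_num,
        show PySem.List.pyRange 1 1 1 = [] from rfl, List.foldl_nil]
      show pvInv s 0 (1, 0, 0, 0)
      have h0 : (pvL s).getD 0 0 = (pvL s)[0]'(by rw [pvL_length]; omega) :=
        List.getD_eq_getElem _ 0 (by rw [pvL_length]; omega)
      refine ⟨0, le_refl _, ?_, ?_, ?_, ?_, ?_, Or.inl rfl⟩
      · exact (pvF_one s (by intro hs; rw [hs] at hk; simp at hk)).symm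
      · rw [h0, pvL_zero s (by omega)]
        ring
      · rfl
      · rw [h0, pvL_zero s (by omega)]
        ring
      · intro k hk1 hk2
        omega
    · have hn1 : 1 ≤ n := by omega
      rw [show ((n + 1 : Nat) : Int) = ((n : Nat) : Int) + 1 from by push_cast; ring,
        PySem.List.pyRange_one_succ_right (by omega : (1 : Int) ≤ ((n : Nat) : Int)),
        List.foldl_append, List.foldl_cons, List.foldl_nil]
      have hstep := pvInv_step s (n - 1) _ (by omega : (n - 1) + 1 < s.length)
        (ih hn1 (by omega))
      rw [show (n - 1) + 1 = n by omega] at hstep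
      rw [show (n + 1 - 1 : Nat) = n by omega]
      exact hstep

theorem pvB_eq (s : List Int) : minRewards_alt s = (pvM s).sum := by
  by_cases h : s = []
  · subst h; rfl
  · have hlen : 1 ≤ s.length := by
      cases s with
      | nil => exact absurd rfl h
      | cons x xs => simp
    unfold minRewards_alt
    rw [if_neg h]
    obtain ⟨t, _, hret, _⟩ := pvInv_fold s s.length hlen (le_refl _)
    rw [hret, show (s.length - 1) + 1 = s.length by omega,
      List.take_of_length_le (le_refl _)]

-- ===== VERDICT (by name: the statement is the Claim_ definition above) =====
theorem minRewards_spec : Claim_equal_minRewards := by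
  intro s _
  unfold Spec_minRewards
  rw [pvA_eq, pvB_eq]
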